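-- pv_equiv track=rewrite | github.com/sebakatzman/Simulador-Discos | __pycache__/algoritmos.py | buscarMenorDistanciaDecrecienteScanAux
-- ===== SOURCE A (Python) =====
-- def buscarMenorDistanciaDecrecienteScanAux(listaAux, cilindro, listaVuelta):
--     resta = 8000
--     distanciaRecorrida = 0
--     listaAuxEliminar = []
--     numero_candidato = 0
--     for numero in listaAux:
--         distanciaRecorrida = cilindro - numero
--         if distanciaRecorrida >= 0:
--             if distanciaRecorrida < resta:
--                 resta = distanciaRecorrida
--                 numero_candidato = numero
--         else:
--             listaAuxEliminar.append(numero)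
--             listaVuelta.append(numero)
--     for lista in listaAuxEliminar:
--         listaAux.remove(lista)
--     return numero_candidato
-- ===== SOURCE B (Python) =====
-- def buscarMenorDistanciaDecrecienteScanAux(listaAux, cilindro, listaVuelta):
--     # Same in-place effects as A: cylinders above 'cilindro' move to listaVuelta,
--     # listaAux keeps only those <= cilindro.  Return value: the closest cylinder
--     # at or below 'cilindro' within distance < 8000, 0 if none.
--     listaVuelta.extend(x for x in listaAux if x > cilindro)
--     listaAux[:] = [x for x in listaAux if x <= cilindro]
--     return max((x for x in listaAux if x > cilindro - 8000), default=0)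
-- ===== Notes on version B (the rewrite author's own statement) =====
-- stated objective: idiomatic
-- what changed: Replaces the running-minimum-distance scan plus the quadratic list.remove loop by two comprehensions (partition in one pass) and max(..., default=0) over the eligible window.
import Mathlib
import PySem

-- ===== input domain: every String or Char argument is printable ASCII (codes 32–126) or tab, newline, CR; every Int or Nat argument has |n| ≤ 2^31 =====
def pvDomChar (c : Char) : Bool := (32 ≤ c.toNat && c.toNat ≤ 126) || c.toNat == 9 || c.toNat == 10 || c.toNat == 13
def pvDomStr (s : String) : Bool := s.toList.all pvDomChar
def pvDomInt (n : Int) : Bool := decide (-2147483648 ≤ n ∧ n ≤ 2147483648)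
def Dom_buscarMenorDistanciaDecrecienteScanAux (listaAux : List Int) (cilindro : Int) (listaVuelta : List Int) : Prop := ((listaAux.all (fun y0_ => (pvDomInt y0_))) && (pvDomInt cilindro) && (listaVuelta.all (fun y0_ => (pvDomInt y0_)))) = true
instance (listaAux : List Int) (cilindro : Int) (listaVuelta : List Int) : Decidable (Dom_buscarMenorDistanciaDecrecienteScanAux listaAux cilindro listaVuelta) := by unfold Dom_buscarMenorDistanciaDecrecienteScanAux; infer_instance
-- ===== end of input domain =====

-- B replaces A's running-minimum-distance scan (plus quadratic remove loop) by a
-- partition comprehension and max(..., default=0); equivalence proved for the RETURN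
-- value only (both Pythons perform the same in-place mutations of listaAux/listaVuelta).

-- ===== PORT A =====
-- loop state: (resta, numero_candidato, listaAuxEliminar, listaVuelta)
def pvStepA (cilindro : Int) (st : Int × Int × List Int × List Int) (numero : Int) : Int × Int × List Int × List Int :=
  let distanciaRecorrida := cilindro - numero
  if distanciaRecorrida ≥ 0 then
    if distanciaRecorrida < st.1 then (distanciaRecorrida, numero, st.2.2) else st
  else (st.1, st.2.1, st.2.2.1 ++ [numero], st.2.2.2 ++ [numero])

def buscarMenorDistanciaDecrecienteScanAux (listaAux : List Int) (cilindro : Int) (listaVuelta : List Int) : Int :=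
  -- the trailing 'for lista in listaAuxEliminar: listaAux.remove(lista)' loop only
  -- mutates listaAux in place and cannot affect the returned numero_candidato
  (listaAux.foldl (pvStepA cilindro) (8000, 0, [], listaVuelta)).2.1

-- ===== PORT B =====
def buscarMenorDistanciaDecrecienteScanAux_alt (listaAux : List Int) (cilindro : Int) (listaVuelta : List Int) : Int :=
  let listaAux' := listaAux.filter (fun x => decide (x ≤ cilindro))
  (PySem.List.max? (listaAux'.filter (fun x => decide (cilindro - 8000 < x))) (fun y => y)).getD 0

-- ===== PRECONDITION & SPEC =====
def Spec_buscarMenorDistanciaDecrecienteScanAux (listaAux : List Int) (cilindro : Int) (listaVuelta : List Int) (out : Int) : Prop := out = buscarMenorDistanciaDecrecienteScanAux_alt listaAux cilindro listaVuelta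
instance (listaAux : List Int) (cilindro : Int) (listaVuelta : List Int) (out : Int) : Decidable (Spec_buscarMenorDistanciaDecrecienteScanAux listaAux cilindro listaVuelta out) := by unfold Spec_buscarMenorDistanciaDecrecienteScanAux; infer_instance

-- ===== CLAIM (what is proved, stated in full; the proofs are below) =====
def Claim_equal_buscarMenorDistanciaDecrecienteScanAux : Prop := ∀ (listaAux : List Int) (cilindro : Int) (listaVuelta : List Int), Dom_buscarMenorDistanciaDecrecienteScanAux listaAux cilindro listaVuelta → Spec_buscarMenorDistanciaDecrecienteScanAux listaAux cilindro listaVuelta (buscarMenorDistanciaDecrecienteScanAux listaAux cilindro listaVuelta)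

-- ===== LEMMAS AND PROOFS =====

-- Invariant of A's loop: the returned candidate is either the untouched accumulator c
-- (no element of xs lies in the window (L - r, L]) or the maximum element of that window.
theorem foldA_spec (L : Int) (xs : List Int) : ∀ (r c : Int) (e v : List Int),
    ((∀ y ∈ xs, ¬(L - r < y ∧ y ≤ L)) ∧ (xs.foldl (pvStepA L) (r, c, e, v)).2.1 = c)
    ∨ (((xs.foldl (pvStepA L) (r, c, e, v)).2.1 ∈ xs
          ∧ L - r < (xs.foldl (pvStepA L) (r, c, e, v)).2.1
          ∧ (xs.foldl (pvStepA L) (r, c, e, v)).2.1 ≤ L)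
        ∧ ∀ y ∈ xs, L - r < y → y ≤ L → y ≤ (xs.foldl (pvStepA L) (r, c, e, v)).2.1) := by
  induction xs with
  | nil => intro r c e v; left; simp
  | cons x xs ih =>
    intro r c e v
    by_cases h1 : L - x ≥ 0
    · by_cases h2 : L - x < r
      · have hstep : pvStepA L (r, c, e, v) x = (L - x, x, e, v) := by
          simp only [pvStepA]
          rw [if_pos h1, if_pos h2]
        rw [List.foldl_cons, hstep]
        rcases ih (L - x) x e v with ⟨hnone, heq⟩ | ⟨⟨hmem, hgt, hle⟩, hmax⟩
        · right
          refine ⟨⟨by simp [heq], by omega, by omega⟩, ?_⟩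
          intro y hy hgy hly
          rcases List.mem_cons.mp hy with rfl | hy'
          · omega
          · have := hnone y hy'
            omega
        · right
          refine ⟨⟨List.mem_cons_of_mem _ hmem, by omega, hle⟩, ?_⟩
          intro y hy hgy hly
          rcases List.mem_cons.mp hy with rfl | hy'
          · omega
          · by_cases hxy : L - (L - x) < y
            · exact hmax y hy' hxy hly
            · omega
      · have hstep : pvStepA L (r, c, e, v) x = (r, c, e, v) := by
          simp only [pvStepA]
          rw [if_pos h1, if_neg h2]
        rw [List.foldl_cons, hstep]
        rcases ih r c e v with ⟨hnone, heq⟩ | ⟨⟨hmem, hgt, hle⟩, hmax⟩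
        · left
          refine ⟨?_, heq⟩
          intro y hy
          rcases List.mem_cons.mp hy with rfl | hy'
          · omega
          · exact hnone y hy'
        · right
          refine ⟨⟨List.mem_cons_of_mem _ hmem, hgt, hle⟩, ?_⟩
          intro y hy hgy hly
          rcases List.mem_cons.mp hy with rfl | hy'
          · omega
          · exact hmax y hy' hgy hly
    · have hstep : pvStepA L (r, c, e, v) x = (r, c, e ++ [x], v ++ [x]) := by
        simp only [pvStepA]
        rw [if_neg h1]
      rw [List.foldl_cons, hstep]
      rcases ih r c (e ++ [x]) (v ++ [x]) with ⟨hnone, heq⟩ | ⟨⟨hmem, hgt, hle⟩, hmax⟩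
      · left
        refine ⟨?_, heq⟩
        intro y hy
        rcases List.mem_cons.mp hy with rfl | hy'
        · omega
        · exact hnone y hy'
      · right
        refine ⟨⟨List.mem_cons_of_mem _ hmem, hgt, hle⟩, ?_⟩
        intro y hy hgy hly
        rcases List.mem_cons.mp hy with rfl | hy'
        · omega
        · exact hmax y hy' hgy hly

theorem filter_filter_window (L : Int) (xs : List Int) :
    (xs.filter (fun x => decide (x ≤ L))).filter (fun x => decide (L - 8000 < x))
      = xs.filter (fun x => decide (L - 8000 < x) && decide (x ≤ L)) := by
  rw [List.filter_filter]

theorem buscarMenorDistanciaDecrecienteScanAux_spec : Claim_equal_buscarMenorDistanciaDecrecienteScanAux := by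
  intro listaAux cilindro listaVuelta _
  unfold Spec_buscarMenorDistanciaDecrecienteScanAux buscarMenorDistanciaDecrecienteScanAux
    buscarMenorDistanciaDecrecienteScanAux_alt
  simp only [filter_filter_window]
  set L := cilindro
  set flt := listaAux.filter (fun x => decide (L - 8000 < x) && decide (x ≤ L)) with hflt
  rcases hmx : PySem.List.max? flt (fun y => y) with _ | m
  · -- the window is empty: A must be in its "untouched accumulator" branch
    have hnil : flt = [] := (PySem.List.max?_eq_none_iff _ _).mp hmx
    have hempty : ∀ y ∈ listaAux, ¬(L - 8000 < y ∧ y ≤ L) := by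
      intro y hy hcon
      have : y ∈ flt := by
        rw [hflt, List.mem_filter]
        exact ⟨hy, by simp [hcon.1, hcon.2]⟩
      simp [hnil] at this
    rcases foldA_spec L listaAux 8000 0 [] listaVuelta with ⟨_, heq⟩ | ⟨⟨hmem, hgt, hle⟩, _⟩
    · simp [heq]
    · exact absurd ⟨hgt, hle⟩ (hempty _ hmem)
  · -- the window is nonempty with maximum m: A's candidate equals m
    have hm_mem : m ∈ flt := PySem.List.max?_mem hmx
    have hm_max : ∀ y ∈ flt, y ≤ m := by
      intro y hy; simpa using PySem.List.max?_isMax hmx y hy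
    have hm_in : m ∈ listaAux ∧ L - 8000 < m ∧ m ≤ L := by
      rw [hflt, List.mem_filter] at hm_mem
      have h2 : L - 8000 < m ∧ m ≤ L := by simpa using hm_mem.2
      exact ⟨hm_mem.1, h2⟩
    rcases foldA_spec L listaAux 8000 0 [] listaVuelta with ⟨hnone, _⟩ | ⟨⟨hmem, hgt, hle⟩, hmax⟩
    · exact absurd ⟨hm_in.2.1, hm_in.2.2⟩ (hnone _ hm_in.1)
    · have h1 : (listaAux.foldl (pvStepA L) (8000, 0, [], listaVuelta)).2.1 ≤ m := by
        apply hm_max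
        rw [hflt, List.mem_filter]
        exact ⟨hmem, by simp [hgt, hle]⟩
      have h2 : m ≤ (listaAux.foldl (pvStepA L) (8000, 0, [], listaVuelta)).2.1 :=
        hmax m hm_in.1 hm_in.2.1 hm_in.2.2
      simp [le_antisymm h1 h2]
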